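-- pv_equiv track=rewrite | github.com/kylejones200/predictive-maintenance-with-time-series-in-python-using-pca-statistics-and-lstms | predictive_maintenance_RUL.py | transition_deltas
-- ===== SOURCE A (Python) =====
-- from collections import defaultdict
--
-- def transition_deltas(true_seq, pred_seq, offset_range):
--     """
--     Compute transition deltas for each predicted transition vs true transition.
--     Returns a dict with average deltas for each transition type (0→1 and 1→2).
--     """
--
--     def find_first_transition(seq, from_state, to_state):
--         for i in range(1, len(seq)):
--             if seq[i - 1] == from_state and seq[i] == to_state:
--                 return i
--         return None
--
--     results = defaultdict(list)
--
--     for from_state, to_state in [(0, 1), (1, 2)]: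
--         true_idx = find_first_transition(true_seq, from_state, to_state)
--         pred_idx = find_first_transition(pred_seq, from_state, to_state)
--         if true_idx is not None and pred_idx is not None:
--             delta = offset_range[pred_idx] - offset_range[true_idx]
--             results[f"{from_state}→{to_state}"].append(delta)
--
--     return results
-- ===== SOURCE B (Python) =====
-- from collections import defaultdict
--
-- TRACKED = [(0, 1), (1, 2)]
--
-- def transition_deltas(true_seq, pred_seq, offset_range):
--     """One pass per sequence: index the first occurrence of every tracked
--     transition pair into a dict, then assemble the deltas from the two indexes."""
--
--     def first_indices(seq):
--         found = {}
--         for i in range(1, len(seq)):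
--             pair = (seq[i - 1], seq[i])
--             if pair in TRACKED and pair not in found:
--                 found[pair] = i
--         return found
--
--     t_idx = first_indices(true_seq)
--     p_idx = first_indices(pred_seq)
--
--     results = defaultdict(list)
--     for pair in TRACKED:
--         if pair in t_idx and pair in p_idx:
--             delta = offset_range[p_idx[pair]] - offset_range[t_idx[pair]]
--             results[f"{pair[0]}\u2192{pair[1]}"].append(delta)
--     return results
-- ===== Notes on version B (the rewrite author's own statement) =====
-- stated objective: alternative
-- what changed: Instead of A's four separate scans (one per (sequence, transition-pair)), B scans each sequence once, building a dict of first-occurrence indices for all tracked pairs, and then assembles the deltas from the two indexes.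
import Mathlib
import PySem

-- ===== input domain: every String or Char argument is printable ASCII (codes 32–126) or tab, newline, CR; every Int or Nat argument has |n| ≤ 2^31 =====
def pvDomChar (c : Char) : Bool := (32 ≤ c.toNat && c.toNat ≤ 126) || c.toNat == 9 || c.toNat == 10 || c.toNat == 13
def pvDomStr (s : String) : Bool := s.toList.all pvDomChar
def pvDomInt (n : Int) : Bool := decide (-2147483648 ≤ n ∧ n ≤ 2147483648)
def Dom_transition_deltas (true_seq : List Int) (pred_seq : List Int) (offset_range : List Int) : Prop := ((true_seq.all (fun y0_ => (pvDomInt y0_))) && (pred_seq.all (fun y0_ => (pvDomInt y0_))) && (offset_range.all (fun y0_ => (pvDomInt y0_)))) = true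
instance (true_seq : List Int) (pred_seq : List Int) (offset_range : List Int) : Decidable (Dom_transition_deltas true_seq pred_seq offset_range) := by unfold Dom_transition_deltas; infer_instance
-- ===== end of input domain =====

-- B replaces A's four per-pair scans by one indexing pass per sequence (a dict of first
-- transition indices) plus an assembly step; same return value, similar cost (objective: alternative).

-- ===== PORT A =====
-- find_first_transition: the loop 'for i in range(1, len(seq))' with early return
def pvFindA (seq : List Int) (a b : Int) : List Int → Option Int
  | [] => none
  | i :: rest =>
    if PySem.List.pyGet? seq (i - 1) = some a ∧ PySem.List.pyGet? seq i = some b then some i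
    else pvFindA seq a b rest

def transition_deltas (true_seq : List Int) (pred_seq : List Int) (offset_range : List Int) : List (String × List Int) :=
  (([((0 : Int), (1 : Int)), (1, 2)]).foldl (fun results pr =>
      match pvFindA true_seq pr.1 pr.2 (PySem.List.pyRange 1 true_seq.length 1),
            pvFindA pred_seq pr.1 pr.2 (PySem.List.pyRange 1 pred_seq.length 1) with
      | some true_idx, some pred_idx =>
          -- offset_range[pred_idx] - offset_range[true_idx]; out-of-range = IndexError, excluded by Pre_
          results.modify (PySem.Int.toStr pr.1 ++ "→" ++ PySem.Int.toStr pr.2) []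
            (fun l => l ++ [(PySem.List.pyGet? offset_range pred_idx).getD 0
                              - (PySem.List.pyGet? offset_range true_idx).getD 0])
      | _, _ => results)
    (PySem.Dict.empty : PySem.Dict String (List Int))).items

-- ===== PORT B =====
def pvTracked : List (Int × Int) := [(0, 1), (1, 2)]

-- body of B's single indexing loop over i in range(1, len(seq))
def pvStep (seq : List Int) (found : PySem.Dict (Int × Int) Int) (i : Int) : PySem.Dict (Int × Int) Int :=
  let pair : Int × Int := ((PySem.List.pyGet? seq (i - 1)).getD 0, (PySem.List.pyGet? seq i).getD 0)
  if pvTracked.contains pair && !found.contains pair then found.insert pair i else found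

def pvFirstIndices (seq : List Int) : PySem.Dict (Int × Int) Int :=
  (PySem.List.pyRange 1 seq.length 1).foldl (pvStep seq) PySem.Dict.empty

def transition_deltas_alt (true_seq : List Int) (pred_seq : List Int) (offset_range : List Int) : List (String × List Int) :=
  let t_idx := pvFirstIndices true_seq
  let p_idx := pvFirstIndices pred_seq
  (pvTracked.foldl (fun results pr =>
      -- 'if pair in t_idx and pair in p_idx'; under the guard both keys are present, so getD's default is dead
      if t_idx.contains pr && p_idx.contains pr then
        results.modify (PySem.Int.toStr pr.1 ++ "→" ++ PySem.Int.toStr pr.2) []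
          (fun l => l ++ [(PySem.List.pyGet? offset_range (p_idx.getD pr 0)).getD 0
                            - (PySem.List.pyGet? offset_range (t_idx.getD pr 0)).getD 0])
      else results)
    (PySem.Dict.empty : PySem.Dict String (List Int))).items

-- ===== PRECONDITION & SPEC =====
-- first transition of a→b at index i (boolean, first-match characterisation)
def pvIsFirstTrans (seq : List Int) (a b : Int) (i : Nat) : Bool :=
  decide (1 ≤ i) && decide (i < seq.length) && (seq[i - 1]? == some a) && (seq[i]? == some b) &&
    (List.range i).all (fun j => !(decide (1 ≤ j) && (seq[j - 1]? == some a) && (seq[j]? == some b)))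

-- Pre_ excludes exactly the IndexError inputs: whenever both sequences have a first 0→1 (or 1→2)
-- transition, both transition indices must be valid indices of offset_range.
def Pre_transition_deltas (true_seq : List Int) (pred_seq : List Int) (offset_range : List Int) : Prop :=
  ∀ pr ∈ ([((0 : Int), (1 : Int)), (1, 2)] : List (Int × Int)),
    ∀ i, i < true_seq.length → ∀ j, j < pred_seq.length →
      pvIsFirstTrans true_seq pr.1 pr.2 i = true → pvIsFirstTrans pred_seq pr.1 pr.2 j = true →
        i < offset_range.length ∧ j < offset_range.length

instance (true_seq : List Int) (pred_seq : List Int) (offset_range : List Int) : Decidable (Pre_transition_deltas true_seq pred_seq offset_range) := by unfold Pre_transition_deltas; infer_instance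

def pvWitness_transition_deltas : List Int × List Int × List Int := ([0, 1, 2], [0, 0, 1], [10, 20, 30])

def Spec_transition_deltas (true_seq : List Int) (pred_seq : List Int) (offset_range : List Int) (out : List (String × List Int)) : Prop := out = transition_deltas_alt true_seq pred_seq offset_range
instance (true_seq : List Int) (pred_seq : List Int) (offset_range : List Int) (out : List (String × List Int)) : Decidable (Spec_transition_deltas true_seq pred_seq offset_range out) := by unfold Spec_transition_deltas; infer_instance

-- ===== CLAIM (what is proved, stated in full; the proofs are below) =====
def Claim_equal_transition_deltas : Prop := ∀ (true_seq : List Int) (pred_seq : List Int) (offset_range : List Int), Dom_transition_deltas true_seq pred_seq offset_range → Pre_transition_deltas true_seq pred_seq offset_range → Spec_transition_deltas true_seq pred_seq offset_range (transition_deltas true_seq pred_seq offset_range)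

-- ===== LEMMAS AND PROOFS =====

-- B's indexing loop, run over any in-range index list L, looks up to exactly what A's scan of L finds
theorem pvFold_get (seq : List Int) (pr : Int × Int) (hpr : pr ∈ pvTracked) :
    ∀ (L : List Int), (∀ i ∈ L, 1 ≤ i ∧ i < (seq.length : Int)) →
      ∀ found : PySem.Dict (Int × Int) Int,
        (L.foldl (pvStep seq) found).get? pr = (found.get? pr).or (pvFindA seq pr.1 pr.2 L) := by
  intro L
  induction L with
  | nil => intro _ found; simp [pvFindA]
  | cons i rest ih =>
    intro h found
    obtain ⟨hi1, hi2⟩ := h i (List.mem_cons_self ..)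
    obtain ⟨x, h1⟩ : ∃ x, PySem.List.pyGet? seq (i - 1) = some x :=
      ⟨_, PySem.List.pyGet?_eq_some_getElem _ (by omega) (by omega)⟩
    obtain ⟨y, h2⟩ : ∃ y, PySem.List.pyGet? seq i = some y :=
      ⟨_, PySem.List.pyGet?_eq_some_getElem _ (by omega) (by omega)⟩
    have hrest := fun j hj => h j (List.mem_cons_of_mem _ hj)
    have hstep : pvStep seq found i =
        (if pvTracked.contains (x, y) && !found.contains (x, y) then found.insert (x, y) i
         else found) := by
      simp [pvStep, h1, h2]
    have hfind : pvFindA seq pr.1 pr.2 (i :: rest) =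
        if (x, y) = pr then some i else pvFindA seq pr.1 pr.2 rest := by
      simp [pvFindA, h1, h2, Prod.ext_iff]
    rw [List.foldl_cons, hstep, hfind]
    by_cases hxy : (x, y) = pr
    · rw [if_pos hxy, hxy]
      by_cases hfc : found.contains pr = true
      · obtain ⟨v, hv⟩ := Option.isSome_iff_exists.mp
          (by rw [← PySem.Dict.contains_eq_isSome_get? (d := found) (k := pr)]; exact hfc)
        rw [if_neg (by simp [hfc]), ih hrest found, hv]
        simp
      · have hfc' : found.contains pr = false := by simpa using hfc
        have hg : found.get? pr = none := by
          rw [PySem.Dict.get?_eq_none_iff_contains]; exact hfc'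
        have htr : pvTracked.contains pr = true := by
          simpa [List.contains_iff_mem] using hpr
        rw [if_pos (by rw [htr, hfc']; rfl), ih hrest, PySem.Dict.get?_insert_self, hg]
        simp
    · have hne : pr ≠ (x, y) := fun he => hxy he.symm
      rw [if_neg hxy]
      by_cases hcnd : (pvTracked.contains (x, y) && !found.contains (x, y)) = true
      · rw [if_pos hcnd, ih hrest]
        congr 1
        exact PySem.Dict.get?_insert_of_ne _ _ hne
      · rw [if_neg hcnd]
        exact ih hrest found

theorem pvFirstIndices_get (seq : List Int) (pr : Int × Int) (hpr : pr ∈ pvTracked) :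
    (pvFirstIndices seq).get? pr = pvFindA seq pr.1 pr.2 (PySem.List.pyRange 1 seq.length 1) := by
  rw [pvFirstIndices, pvFold_get seq pr hpr _
    (fun i hi => by simpa using (PySem.List.mem_pyRange_one.mp hi))]
  simp

theorem ports_agree (true_seq pred_seq offset_range : List Int) :
    transition_deltas true_seq pred_seq offset_range = transition_deltas_alt true_seq pred_seq offset_range := by
  simp only [transition_deltas, transition_deltas_alt, pvTracked, List.foldl_cons, List.foldl_nil,
    PySem.Dict.contains_eq_isSome_get?, PySem.Dict.getD_eq_get?_getD,
    pvFirstIndices_get true_seq (0, 1) (by simp [pvTracked]),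
    pvFirstIndices_get true_seq (1, 2) (by simp [pvTracked]),
    pvFirstIndices_get pred_seq (0, 1) (by simp [pvTracked]),
    pvFirstIndices_get pred_seq (1, 2) (by simp [pvTracked])]
  cases pvFindA true_seq (0, 1).1 (0, 1).2 (PySem.List.pyRange 1 true_seq.length 1) <;>
    cases pvFindA pred_seq (0, 1).1 (0, 1).2 (PySem.List.pyRange 1 pred_seq.length 1) <;>
    cases pvFindA true_seq (1, 2).1 (1, 2).2 (PySem.List.pyRange 1 true_seq.length 1) <;>
    cases pvFindA pred_seq (1, 2).1 (1, 2).2 (PySem.List.pyRange 1 pred_seq.length 1) <;>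
    rfl

-- ===== VERDICT (by name: the statement is the Claim_ definition above) =====
theorem transition_deltas_spec : Claim_equal_transition_deltas := by
  intro t p o _ _
  unfold Spec_transition_deltas
  exact ports_agree t p o
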